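-- pv_equiv track=rewrite | github.com/SauravSinha76/scaler | class12/to_decimal.py | solve
-- ===== SOURCE A (Python) =====
-- def solve(A,B):
--
--     ans =0
--     pow = 1
--
--     while A > 0:
--         r = A % 10
--         A = int(A / 10)
--
--         ans += r * pow
--         pow *= B
--
--     return ans
-- ===== SOURCE B (Python) =====
-- def solve(A, B):
--     # read the decimal digits from str(A) and Horner-fold them MSB-first
--     result = 0
--     if A > 0:
--         for ch in str(A):
--             result = result * B + (ord(ch) - 48)
--     return result
-- ===== Notes on version B (the rewrite author's own statement) =====
-- stated objective: alternative
-- what changed: B reads the decimal digits of A from str(A) and combines them most-significant-first with Horner's rule (no division loop, no running power of B), instead of A's divide-by-10 loop accumulating digit*power.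
import Mathlib
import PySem

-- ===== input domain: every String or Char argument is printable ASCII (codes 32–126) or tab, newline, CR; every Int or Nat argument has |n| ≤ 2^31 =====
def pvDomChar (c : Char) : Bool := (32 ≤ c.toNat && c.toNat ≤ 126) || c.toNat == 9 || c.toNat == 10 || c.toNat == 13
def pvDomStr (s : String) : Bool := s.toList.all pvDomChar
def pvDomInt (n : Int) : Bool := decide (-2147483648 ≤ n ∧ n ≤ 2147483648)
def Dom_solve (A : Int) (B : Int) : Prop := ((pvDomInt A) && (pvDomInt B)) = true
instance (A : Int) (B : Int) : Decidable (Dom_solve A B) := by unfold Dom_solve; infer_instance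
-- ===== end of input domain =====

-- B replaces A's divide-by-10 loop with a running power of B by a Horner fold over the
-- decimal string str(A), most-significant digit first; return values agree on Dom.
-- NOTE on int(A/10): on Dom (|A| ≤ 2^31 < 2^53) float division is exact and A > 0 in the loop,
-- so int(A/10) = A // 10 exactly; A's port uses PySem.Int.floordiv, exact there.

-- ===== PORT A =====
-- while A > 0: r = A % 10; A = int(A/10); ans += r*pow; pow *= B
def solveLoopA (A B ans pow : Int) : Int :=
  if _h : 0 < A then
    solveLoopA (PySem.Int.floordiv A 10) B (ans + (PySem.Int.mod A 10) * pow) (pow * B)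
  else ans
termination_by A.toNat
decreasing_by
  rw [PySem.Int.floordiv_eq_ediv_of_pos (by omega : (0:Int) < 10)]
  omega

def solve (A : Int) (B : Int) : Int := solveLoopA A B 0 1

-- ===== PORT B =====
-- result = 0; if A > 0: for ch in str(A): result = result * B + (ord(ch) - 48)
def solve_alt (A : Int) (B : Int) : Int :=
  if 0 < A then
    (PySem.Int.toChars A).foldl (fun result c => result * B + ((c.toNat : Int) - 48)) 0
  else 0

-- ===== PRECONDITION & SPEC =====
def Spec_solve (A : Int) (B : Int) (out : Int) : Prop := out = solve_alt A B
instance (A : Int) (B : Int) (out : Int) : Decidable (Spec_solve A B out) := by unfold Spec_solve; infer_instance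

-- ===== CLAIM =====
def Claim_equal_solve : Prop := ∀ (A : Int) (B : Int), Dom_solve A B → Spec_solve A B (solve A B)

-- ===== LEMMAS AND PROOFS =====

-- the value A's loop computes, as a recursion (proof-side characterisation)
def hval (B A : Int) : Int :=
  if _h : 0 < A then B * hval B (PySem.Int.floordiv A 10) + PySem.Int.mod A 10 else 0
termination_by A.toNat
decreasing_by
  rw [PySem.Int.floordiv_eq_ediv_of_pos (by omega : (0:Int) < 10)]
  omega

-- loop invariant: the fused loop equals ans + pow * hval B A
lemma solveLoopA_eq (A B ans pow : Int) :
    solveLoopA A B ans pow = ans + pow * hval B A := by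
  fun_induction solveLoopA A B ans pow with
  | case1 A ans pow h ih =>
      rw [hval.eq_def]
      simp only [dif_pos h, ih]
      ring
  | case2 A ans pow h =>
      rw [hval.eq_def]
      simp only [dif_neg h, mul_zero, add_zero]

-- the decimal digit characters of n, most-significant first (proof-side model of toDigitsCore)
def decChars (n : Nat) : List Char :=
  if h : n / 10 = 0 then [Nat.digitChar (n % 10)]
  else decChars (n / 10) ++ [Nat.digitChar (n % 10)]
termination_by n
decreasing_by
  exact Nat.div_lt_self (by omega) (by omega)

lemma toDigitsCore_eq_decChars :
    ∀ (fuel n : Nat) (acc : List Char), n < fuel →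
      Nat.toDigitsCore 10 fuel n acc = decChars n ++ acc := by
  intro fuel
  induction fuel with
  | zero => intro n acc h; omega
  | succ fuel ih =>
      intro n acc h
      rw [Nat.toDigitsCore, decChars.eq_def]
      by_cases h10 : n / 10 = 0
      · simp [h10]
      · have hn : 0 < n := by omega
        have : n / 10 < fuel := by
          have := Nat.div_lt_self hn (by omega : 1 < 10)
          omega
        simp only [h10, if_false]
        rw [ih (n / 10) (Nat.digitChar (n % 10) :: acc) this]
        simp

lemma digitChar_toNat (m : Nat) (h : m < 10) :
    ((Nat.digitChar m).toNat : Int) - 48 = (m : Int) := by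
  interval_cases m <;> decide

lemma hval_natCast (B : Int) (n : Nat) (h : 0 < n) :
    hval B (n : Int) = B * hval B ((n / 10 : Nat) : Int) + ((n % 10 : Nat) : Int) := by
  rw [hval.eq_def]
  have h0 : (0 : Int) < (n : Int) := by exact_mod_cast h
  have hd : PySem.Int.floordiv (n : Int) 10 = ((n / 10 : Nat) : Int) := by
    exact_mod_cast PySem.Int.floordiv_natCast n 10
  have hm : PySem.Int.mod (n : Int) 10 = ((n % 10 : Nat) : Int) := by
    exact_mod_cast PySem.Int.mod_natCast n 10
  rw [dif_pos h0, hd, hm]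

lemma foldl_decChars (B : Int) :
    ∀ (n : Nat) (r : Int),
      (decChars n).foldl (fun result c => result * B + ((c.toNat : Int) - 48)) r
        = r * B ^ (decChars n).length + hval B (n : Int) := by
  intro n
  induction n using Nat.strong_induction_on with
  | _ n ih =>
      intro r
      rw [decChars.eq_def]
      by_cases h10 : n / 10 = 0
      · have hm : n % 10 = n := by omega
        simp only [dif_pos h10, List.foldl_cons, List.foldl_nil, List.length_singleton]
        rw [digitChar_toNat (n % 10) (by omega)]
        by_cases hn : 0 < n
        · rw [hval_natCast B n hn, h10, hval.eq_def]
          simp [hm]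
        · have : n = 0 := by omega
          subst this
          rw [hval.eq_def]
          simp
      · have hn : 0 < n := by omega
        have hlt : n / 10 < n := Nat.div_lt_self hn (by omega)
        simp only [dif_neg h10, List.foldl_append, List.foldl_cons, List.foldl_nil,
          List.length_append, List.length_singleton]
        rw [ih (n / 10) hlt r, digitChar_toNat (n % 10) (by omega),
          hval_natCast B n hn]
        ring

lemma solve_alt_eq_hval (A B : Int) : solve_alt A B = hval B A := by
  unfold solve_alt
  by_cases h : 0 < A
  · rw [if_pos h]
    have hA : ¬ A < 0 := by omega
    have htc : PySem.Int.toChars A = decChars A.toNat := by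
      rw [PySem.Int.toChars, if_neg hA, Nat.toDigits,
        toDigitsCore_eq_decChars (A.toNat + 1) A.toNat [] (by omega)]
      simp
    rw [htc, foldl_decChars B A.toNat 0]
    have : ((A.toNat : Nat) : Int) = A := by omega
    rw [this]
    ring
  · rw [if_neg h, hval.eq_def]
    simp only [dif_neg h]

-- ===== VERDICT =====
theorem solve_spec : Claim_equal_solve := by
  intro A B _
  unfold Spec_solve solve
  rw [solveLoopA_eq, solve_alt_eq_hval]
  ring
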